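-- pv_equiv track=rewrite | github.com/notfani/NumberFilter | filters/math/divisor_count_filter.py | divisor_count_filter
-- ===== SOURCE A (Python) =====
-- import math
--
-- def divisor_count(n: int) -> int:
--     n = abs(n)
--     if n == 0:
--         return 0
--
--     limit = int(math.isqrt(n))
--     count = 0
--     for i in range(1, limit + 1):
--         if n % i == 0:
--             count += 2 if i * i != n else 1
--     return count
--
-- def divisor_count_filter(numbers, target, mode="equals"):
--     if target <= 0 or mode not in {"equals", "greater", "less"}:
--         return []
--
--     cmp = {
--         "equals": lambda c: c == target,
--         "greater": lambda c: c > target,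
--         "less": lambda c: c < target,
--     }[mode]
--     return [n for n in numbers if cmp(divisor_count(n))]
-- ===== SOURCE B (Python) =====
-- def divisor_count(n: int) -> int:
--     n = abs(n)
--     if n == 0:
--         return 0
--     count = 1
--     i = 2
--     while i * i <= n:
--         if n % i == 0:
--             e = 0
--             while n % i == 0:
--                 n //= i
--                 e += 1
--             count *= e + 1
--         i += 1
--     if n > 1:
--         count *= 2
--     return count
--
-- def divisor_count_filter(numbers, target, mode="equals"):
--     if target <= 0 or mode not in ("equals", "greater", "less"):
--         return []
--     out = []
--     for n in numbers:
--         c = divisor_count(n)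
--         if (mode == "equals" and c == target) or \
--            (mode == "greater" and c > target) or \
--            (mode == "less" and c < target):
--             out.append(n)
--     return out
-- ===== Notes on version B (the rewrite author's own statement) =====
-- stated objective: alternative
-- what changed: divisor_count no longer counts divisor pairs up to sqrt(n); B trial-divides abs(n) into prime-power factors and returns the product of (exponent+1), and the filter is an explicit accumulator loop with the three comparisons inlined instead of a dict of lambdas over a list comprehension.
import Mathlib
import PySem

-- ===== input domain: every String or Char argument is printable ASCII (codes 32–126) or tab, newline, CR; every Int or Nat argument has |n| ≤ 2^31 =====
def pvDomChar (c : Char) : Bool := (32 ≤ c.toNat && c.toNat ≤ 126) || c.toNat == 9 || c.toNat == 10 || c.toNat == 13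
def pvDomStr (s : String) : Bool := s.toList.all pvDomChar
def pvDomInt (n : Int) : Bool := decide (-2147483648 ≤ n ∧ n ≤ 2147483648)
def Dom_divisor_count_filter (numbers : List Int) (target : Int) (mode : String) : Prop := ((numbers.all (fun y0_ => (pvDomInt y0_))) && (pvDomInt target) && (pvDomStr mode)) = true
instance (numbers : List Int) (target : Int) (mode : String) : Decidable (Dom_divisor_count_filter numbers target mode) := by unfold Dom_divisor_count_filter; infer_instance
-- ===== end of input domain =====

-- B replaces A's divisor-pair counting up to √n by trial-division prime factorization,
-- returning the product of (exponent + 1); objective: alternative algorithm, similar cost.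

-- ===== PORT A =====
-- A's divisor_count: n = abs(n); 0 for n == 0; else count i in range(1, isqrt(n)+1) dividing n,
-- weighting 2 (or 1 when i*i == n). abs(n) is nonnegative, so the loop runs in Nat
-- (Python's % on nonnegative ints is Nat's %, isqrt is Nat.sqrt); range(1, limit+1) = List.range' 1 limit.
def pyDivisorCount (n : Int) : Int :=
  let m := n.natAbs
  if m = 0 then 0
  else
    let count : Nat := (List.range' 1 (Nat.sqrt m)).foldl
      (fun count i => if m % i = 0 then count + (if i * i ≠ m then 2 else 1) else count) 0
    (count : Int)

def divisor_count_filter (numbers : List Int) (target : Int) (mode : String) : List Int :=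
  if target ≤ 0 ∨ ¬(mode = "equals" ∨ mode = "greater" ∨ mode = "less") then []
  else
    -- the dict of lambdas, keyed by mode
    let cmp : Int → Bool :=
      if mode = "equals" then (fun c => c == target)
      else if mode = "greater" then (fun c => c > target)
      else (fun c => c < target)
    numbers.filter (fun n => cmp (pyDivisorCount n))

-- ===== PORT B =====
-- Source B's inner `while n % i == 0: n //= i; e += 1`, returning (e, n // i**e).
-- The dite guard only makes the recursion total; at every call site 2 ≤ i and 0 < m hold.
def pyStripFac (i m : Nat) : Nat × Nat :=
  if h : 2 ≤ i ∧ 0 < m ∧ m % i = 0 then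
    let p := pyStripFac i (m / i)
    (p.1 + 1, p.2)
  else (0, m)
termination_by m
decreasing_by exact Nat.div_lt_self h.2.1 (by omega)

-- used by pyDcGo's decreasing_by
theorem pyStripFac_snd_le (i m : Nat) : (pyStripFac i m).2 ≤ m := by
  fun_induction pyStripFac i m with
  | case1 m h p ih => exact le_trans ih (Nat.div_le_self _ _)
  | case2 m h => exact le_refl m

theorem pyStripFac_snd_lt (i m : Nat) (h2 : 2 ≤ i) (hm : 0 < m) (hd : m % i = 0) :
    (pyStripFac i m).2 < m := by
  rw [pyStripFac, dif_pos ⟨h2, hm, hd⟩]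
  exact lt_of_le_of_lt (pyStripFac_snd_le i (m / i)) (Nat.div_lt_self hm (by omega))

-- Source B's outer `while i * i <= n` loop carrying the running product `count`;
-- the trailing `if n > 1: count *= 2` is the exit branch.
def pyDcGo (i m count : Nat) : Nat :=
  if h : 2 ≤ i ∧ i * i ≤ m then
    if hd : m % i = 0 then
      let p := pyStripFac i m
      pyDcGo (i + 1) p.2 (count * (p.1 + 1))
    else pyDcGo (i + 1) m count
  else if 1 < m then count * 2 else count
termination_by (m, m + 1 - i)
decreasing_by
  · exact Prod.Lex.left _ _ (pyStripFac_snd_lt i m h.1 (by nlinarith [h.1, h.2]) hd)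
  · refine Prod.Lex.right m ?_
    have h1 : i ≤ i * i := Nat.le_mul_of_pos_left i (by omega)
    omega

def pyDivisorCountAlt (n : Int) : Int :=
  let m := n.natAbs
  if m = 0 then 0 else (pyDcGo 2 m 1 : Int)

def divisor_count_filter_alt (numbers : List Int) (target : Int) (mode : String) : List Int :=
  if target ≤ 0 ∨ ¬(mode = "equals" ∨ mode = "greater" ∨ mode = "less") then []
  else
    numbers.foldl
      (fun out n =>
        let c := pyDivisorCountAlt n
        if (mode = "equals" ∧ c = target) ∨ (mode = "greater" ∧ c > target) ∨
            (mode = "less" ∧ c < target) then out ++ [n]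
        else out) []

-- ===== PRECONDITION & SPEC =====
def Spec_divisor_count_filter (numbers : List Int) (target : Int) (mode : String) (out : List Int) : Prop := out = divisor_count_filter_alt numbers target mode
instance (numbers : List Int) (target : Int) (mode : String) (out : List Int) : Decidable (Spec_divisor_count_filter numbers target mode out) := by unfold Spec_divisor_count_filter; infer_instance

-- ===== CLAIM (what is proved, stated in full; the proofs are below) =====
def Claim_equal_divisor_count_filter : Prop := ∀ (numbers : List Int) (target : Int) (mode : String), Dom_divisor_count_filter numbers target mode → Spec_divisor_count_filter numbers target mode (divisor_count_filter numbers target mode)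

-- ===== LEMMAS AND PROOFS =====

-- A's loop as a Finset sum
theorem loopA_sum (m : Nat) (s : Nat) (acc : Nat) :
    (List.range' 1 s).foldl
      (fun count i => if m % i = 0 then count + (if i * i ≠ m then 2 else 1) else count) acc
    = acc + ∑ i ∈ Finset.Ico 1 (s + 1), (if m % i = 0 then (if i * i ≠ m then 2 else 1) else 0) := by
  induction s generalizing acc with
  | zero => simp
  | succ s ih =>
      rw [List.range'_1_concat, List.foldl_append, ih]
      rw [Finset.sum_Ico_succ_top (a := 1) (b := s + 1) (by omega)]
      simp only [List.foldl_cons, List.foldl_nil, Nat.add_comm 1 s]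
      split
      · split <;> omega
      · omega

-- the weighted √-pair count equals the number of divisors
theorem sqrt_pair_count (m : Nat) (hm : 0 < m) :
    (∑ i ∈ Finset.Ico 1 (Nat.sqrt m + 1), (if m % i = 0 then (if i * i ≠ m then 2 else 1) else 0))
    = m.divisors.card := by
  set s := Nat.sqrt m with hs
  have hss : s * s ≤ m := Nat.sqrt_le m
  have hlt : m < (s + 1) * (s + 1) := Nat.lt_succ_sqrt m
  have hs0 : 0 < s := Nat.sqrt_pos.mpr hm
  -- split the weight 2 = 1 + 1
  have hsplit : ∀ i ∈ Finset.Ico 1 (s + 1),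
      (if m % i = 0 then (if i * i ≠ m then 2 else 1) else 0)
      = ((if i ∣ m then 1 else 0) + (if i ∣ m ∧ i * i ≠ m then 1 else 0)) := by
    intro i hi
    simp only [Finset.mem_Ico] at hi
    have : m % i = 0 ↔ i ∣ m := by
      constructor
      · exact Nat.dvd_of_mod_eq_zero
      · exact Nat.mod_eq_zero_of_dvd
    split_ifs with h1 h2 h3 h4 h5 <;> simp_all <;> omega
  rw [Finset.sum_congr rfl hsplit, Finset.sum_add_distrib]
  rw [← Finset.card_filter, ← Finset.card_filter]
  have e1 : (Finset.Ico 1 (s + 1)).filter (· ∣ m) = m.divisors.filter (· ≤ s) := by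
    ext i
    simp only [Finset.mem_filter, Finset.mem_Ico, Nat.mem_divisors]
    constructor
    · rintro ⟨⟨h1, h2⟩, h3⟩; exact ⟨⟨h3, by omega⟩, by omega⟩
    · rintro ⟨⟨h1, _⟩, h2⟩
      exact ⟨⟨Nat.pos_of_dvd_of_pos h1 hm, by omega⟩, h1⟩
  have e2 : ((Finset.Ico 1 (s + 1)).filter (fun i => i ∣ m ∧ i * i ≠ m)).card
      = (m.divisors.filter (fun d => ¬ d ≤ s)).card := by
    apply Finset.card_bij' (fun i _ => m / i) (fun j _ => m / j)
    · intro i hi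
      simp only [Finset.mem_filter, Finset.mem_Ico, Nat.mem_divisors, not_le] at hi ⊢
      obtain ⟨⟨hi1, hi2⟩, hid, hisq⟩ := hi
      refine ⟨⟨Nat.div_dvd_of_dvd hid, by omega⟩, ?_⟩
      -- s < m / i
      by_contra hle
      push_neg at hle
      have hmi : i * (m / i) = m := Nat.mul_div_cancel' hid
      have h1 : m ≤ i * s := by calc m = i * (m / i) := hmi.symm
                                    _ ≤ i * s := Nat.mul_le_mul_left i hle
      have h2 : i * s ≤ s * s := Nat.mul_le_mul_right s (by omega)
      have h4 : i * s = s * s := le_antisymm h2 (by omega)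
      have h5 : i = s := Nat.eq_of_mul_eq_mul_right hs0 h4
      rw [h5] at h1 hisq
      omega
    · intro j hj
      simp only [Finset.mem_filter, Finset.mem_Ico, Nat.mem_divisors, not_le] at hj ⊢
      obtain ⟨⟨hjd, _⟩, hjs⟩ := hj
      have hj0 : 0 < j := by omega
      have hjm : j ≤ m := Nat.le_of_dvd hm hjd
      have hpos : 0 < m / j := Nat.div_pos hjm hj0
      have hle : m / j ≤ s := by
        have : m / j < s + 1 := by
          rw [Nat.div_lt_iff_lt_mul hj0]
          calc m < (s + 1) * (s + 1) := hlt
            _ ≤ (s + 1) * j := Nat.mul_le_mul_left _ (by omega)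
        omega
      refine ⟨⟨by omega, by omega⟩, Nat.div_dvd_of_dvd hjd, ?_⟩
      -- (m / j)² ≠ m
      intro heq
      set k := m / j with hk
      have hk1 : m / k = k := by rw [← heq]; exact Nat.mul_div_cancel_left k hpos
      have hjj : m / k = j := Nat.div_div_self hjd (by omega)
      omega
    · intro i hi
      simp only [Finset.mem_filter, Finset.mem_Ico] at hi
      exact Nat.div_div_self hi.2.1 (by omega)
    · intro j hj
      simp only [Finset.mem_filter, Nat.mem_divisors] at hj
      exact Nat.div_div_self hj.1.1 (by omega)
  rw [e1, e2]
  exact Finset.card_filter_add_card_filter_not (s := m.divisors) (p := (· ≤ s))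
-- B's inner loop: m = i^e * m' with i ∤ m'
theorem pyStripFac_spec (i : Nat) (h2 : 2 ≤ i) : ∀ m : Nat, 0 < m →
    i ^ (pyStripFac i m).1 * (pyStripFac i m).2 = m ∧
      ¬ i ∣ (pyStripFac i m).2 ∧ 0 < (pyStripFac i m).2 := by
  intro m
  induction m using Nat.strong_induction_on with
  | _ m ih =>
    intro hm
    rw [pyStripFac]
    by_cases h : 2 ≤ i ∧ 0 < m ∧ m % i = 0
    · rw [dif_pos h]
      have hid : i ∣ m := Nat.dvd_of_mod_eq_zero h.2.2
      have hpos : 0 < m / i := Nat.div_pos (Nat.le_of_dvd hm hid) (by omega)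
      obtain ⟨heq, hnd, hp⟩ := ih (m / i) (Nat.div_lt_self hm (by omega)) hpos
      refine ⟨?_, hnd, hp⟩
      simp only []
      rw [pow_succ, mul_comm (i ^ _) i, mul_assoc, heq]
      exact Nat.mul_div_cancel' hid
    · rw [dif_neg h]
      push_neg at h
      refine ⟨by simp, ?_, hm⟩
      intro hd
      exact absurd (Nat.mod_eq_zero_of_dvd hd) (h h2 hm)

-- B's outer loop computes count * d(m) when m has no prime factor below i
theorem pyDcGo_eq : ∀ (i m count : Nat), 2 ≤ i → 0 < m →
    (∀ p, p.Prime → p ∣ m → i ≤ p) → pyDcGo i m count = count * m.divisors.card := by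
  intro i m count
  fun_induction pyDcGo i m count with
  | case1 i m count h hd p ih =>
    intro h2 hm hmin
    obtain ⟨heq, hnd, hpos⟩ := pyStripFac_spec i h.1 m hm
    have hid : i ∣ m := Nat.dvd_of_mod_eq_zero hd
    have hip : i.Prime := by
      rw [Nat.prime_def_minFac]
      refine ⟨h.1, le_antisymm (Nat.minFac_le (by omega)) ?_⟩
      exact hmin _ (Nat.minFac_prime (by omega)) (dvd_trans (Nat.minFac_dvd i) hid)
    have hcop : Nat.Coprime (i ^ p.1) p.2 :=
      Nat.Coprime.pow_left _ ((Nat.Prime.coprime_iff_not_dvd hip).mpr hnd)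
    have hdm : m.divisors.card = (p.1 + 1) * p.2.divisors.card := by
      rw [← heq, Nat.Coprime.card_divisors_mul hcop, Nat.divisors_prime_pow hip,
        Finset.card_map, Finset.card_range]
    have hpm : p.2 ∣ m := Dvd.intro_left _ heq
    rw [ih (by omega) hpos ?_, hdm]
    · ring
    · intro q hq hqd
      have h1 : i ≤ q := hmin q hq (dvd_trans hqd hpm)
      by_cases hqe : q = i
      · subst hqe; exact absurd hqd hnd
      · omega
  | case2 i m count h hd ih =>
    intro h2 hm hmin
    refine ih (by omega) hm ?_
    intro q hq hqd
    have h1 := hmin q hq hqd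
    by_cases hqe : q = i
    · subst hqe; exact absurd (Nat.mod_eq_zero_of_dvd hqd) hd
    · omega
  | case3 i m count h hlt =>
    intro h2 hm hmin
    push_neg at h
    have him : m < i * i := h h2
    have hmp : m.Prime := by
      by_contra hnp
      have h3 := Nat.minFac_sq_le_self (by omega) hnp
      have h4 := hmin _ (Nat.minFac_prime (by omega)) (Nat.minFac_dvd m)
      rw [pow_two] at h3
      nlinarith
    rw [Nat.Prime.divisors hmp, Finset.card_pair (by omega)]
  | case4 i m count h hlt =>
    intro h2 hm hmin
    have hm1' : m = 1 := by omega
    subst hm1'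
    simp [Nat.divisors_one]

-- the two divisor-count helpers agree
theorem count_eq (n : Int) : pyDivisorCount n = pyDivisorCountAlt n := by
  unfold pyDivisorCount pyDivisorCountAlt
  by_cases h : n.natAbs = 0
  · simp [h]
  · simp only [if_neg h]
    have hm : 0 < n.natAbs := by omega
    have : (List.range' 1 (Nat.sqrt n.natAbs)).foldl
        (fun count i => if n.natAbs % i = 0 then count + (if i * i ≠ n.natAbs then 2 else 1) else count) 0
        = pyDcGo 2 n.natAbs 1 := by
      rw [loopA_sum, sqrt_pair_count _ hm, Nat.zero_add,
        pyDcGo_eq 2 n.natAbs 1 (le_refl 2) hm (fun p hp _ => hp.two_le), Nat.one_mul]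
    simp only [this]

-- B's append loop is A's filter
theorem filter_loop (q : Int → Bool) (l : List Int) (acc : List Int)
    (f : List Int → Int → List Int) (hf : ∀ out n, f out n = if q n then out ++ [n] else out) :
    l.foldl f acc = acc ++ l.filter q := by
  induction l generalizing acc with
  | nil => simp
  | cons x xs ih => rw [List.foldl_cons, hf, List.filter_cons]; by_cases h : q x <;> simp [h, ih]

-- ===== VERDICT (by name: the statement is the Claim_ definition above) =====
theorem divisor_count_filter_spec : Claim_equal_divisor_count_filter := by
  intro numbers target mode _
  unfold Spec_divisor_count_filter divisor_count_filter divisor_count_filter_alt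
  by_cases hg : target ≤ 0 ∨ ¬(mode = "equals" ∨ mode = "greater" ∨ mode = "less")
  · rw [if_pos hg, if_pos hg]
  · rw [if_neg hg, if_neg hg]
    push_neg at hg
    obtain ⟨ht, hmode⟩ := hg
    rcases hmode with hm | hm | hm <;> subst hm <;>
    · rw [filter_loop _ numbers [] _ ?_, List.nil_append]
      intro out n
      simp only [count_eq n]
      split_ifs <;> simp_all <;> omega
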